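-- pv_equiv track=rewrite | github.com/ShadowDara/Tech-Tricks | __OTHER__/__SCRIPTS__/unindexed/24_02.py | decreasing_with_dampener
-- ===== SOURCE A (Python) =====
-- def decreasing(list):
--     length = len(list)
--     for b in range(0, length - 1):
--         if (list[b] - list[b+1]) >= 1 and (list[b] - list[b+1]) <= 3:
--             pass
--         else:
--             return False
--     return True
--
-- def decreasing_with_dampener(lst):
--     if decreasing(lst):
--         return True
--
--     for i in range(len(lst)):
--         new_lst = lst[:i] + lst[i+1:]
--         if decreasing(new_lst):
--             return True
--
--     return False
-- ===== SOURCE B (Python) =====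
-- def decreasing_with_dampener(lst):
--     # O(n): find the first bad adjacent pair; only removing one of its two
--     # endpoints can repair the sequence.
--     def chain(xs):
--         return all(1 <= a - b <= 3 for a, b in zip(xs, xs[1:]))
--     j = next((k for k, (a, b) in enumerate(zip(lst, lst[1:]))
--               if not (1 <= a - b <= 3)), None)
--     if j is None:
--         return True
--     return chain(lst[:j] + lst[j + 1:]) or chain(lst[:j + 1] + lst[j + 2:])
-- ===== Notes on version B (the rewrite author's own statement) =====
-- stated objective: faster
-- what changed: Instead of retrying decreasing() on every one-element removal, B finds the first bad adjacent pair in one pass and only checks removal of its two endpoints.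
import Mathlib
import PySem

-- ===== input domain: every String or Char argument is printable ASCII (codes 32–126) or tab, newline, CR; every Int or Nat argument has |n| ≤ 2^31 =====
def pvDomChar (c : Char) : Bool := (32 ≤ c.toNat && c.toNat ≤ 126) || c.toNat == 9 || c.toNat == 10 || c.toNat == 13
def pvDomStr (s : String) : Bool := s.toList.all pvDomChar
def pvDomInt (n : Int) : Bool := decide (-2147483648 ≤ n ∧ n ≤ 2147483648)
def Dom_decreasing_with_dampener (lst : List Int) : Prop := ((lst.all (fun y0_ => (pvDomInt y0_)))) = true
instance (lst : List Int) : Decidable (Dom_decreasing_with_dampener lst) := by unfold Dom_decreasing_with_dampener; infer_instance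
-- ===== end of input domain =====

-- B replaces A's try-every-removal O(n^2) scan by a single pass: only the two
-- endpoints of the FIRST bad adjacent pair can repair the list (objective: faster).

-- ===== PORT A =====
-- A's helper 'decreasing': loop over b in range(0, len-1), early return False = all
def pvDecreasingA (l : List Int) : Bool :=
  (List.range (l.length - 1)).all (fun b =>
    decide (1 ≤ l.getD b 0 - l.getD (b + 1) 0 ∧ l.getD b 0 - l.getD (b + 1) 0 ≤ 3))

def decreasing_with_dampener (lst : List Int) : Bool :=
  if pvDecreasingA lst then true
  else
    -- for i in range(len(lst)): new_lst = lst[:i] + lst[i+1:]; early return True = any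
    (List.range lst.length).any (fun i =>
      pvDecreasingA (PySem.List.slice lst none (some (i : Int)) ++
                     PySem.List.slice lst (some ((i : Int) + 1)) none))

-- ===== PORT B =====
-- B's helper 'chain': all(1 <= a - b <= 3 for a, b in zip(xs, xs[1:]))
def pvChainB (xs : List Int) : Bool :=
  (xs.zip (PySem.List.slice xs (some 1) none)).all (fun p =>
    decide (1 ≤ p.1 - p.2 ∧ p.1 - p.2 ≤ 3))

def decreasing_with_dampener_alt (lst : List Int) : Bool :=
  -- j = first index of a bad adjacent pair, None if no such pair
  match (lst.zip (PySem.List.slice lst (some 1) none)).findIdx?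
      (fun p => !decide (1 ≤ p.1 - p.2 ∧ p.1 - p.2 ≤ 3)) with
  | none => true
  | some j =>
      pvChainB (PySem.List.slice lst none (some (j : Int)) ++
                PySem.List.slice lst (some ((j : Int) + 1)) none) ||
      pvChainB (PySem.List.slice lst none (some ((j : Int) + 1)) ++
                PySem.List.slice lst (some ((j : Int) + 2)) none)

-- ===== PRECONDITION & SPEC =====
def Spec_decreasing_with_dampener (lst : List Int) (out : Bool) : Prop := out = decreasing_with_dampener_alt lst
instance (lst : List Int) (out : Bool) : Decidable (Spec_decreasing_with_dampener lst out) := by unfold Spec_decreasing_with_dampener; infer_instance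

-- ===== CLAIM (what is proved, stated in full; the proofs are below) =====
def Claim_equal_decreasing_with_dampener : Prop := ∀ (lst : List Int), Dom_decreasing_with_dampener lst → Spec_decreasing_with_dampener lst (decreasing_with_dampener lst)

-- ===== LEMMAS AND PROOFS =====

-- the mathematical content of both "is decreasing by steps in [1,3]" checks
def pvGood (l : List Int) : Prop :=
  ∀ j : Nat, (h : j + 1 < l.length) → 1 ≤ l[j] - l[j + 1] ∧ l[j] - l[j + 1] ≤ 3

lemma pvDecreasingA_iff (l : List Int) : pvDecreasingA l = true ↔ pvGood l := by
  unfold pvDecreasingA pvGood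
  simp only [List.all_eq_true, List.mem_range, decide_eq_true_eq]
  constructor
  · intro h j hj
    have hb : j < l.length - 1 := by omega
    have := h j hb
    rwa [List.getD_eq_getElem l 0 (by omega), List.getD_eq_getElem l 0 (by omega)] at this
  · intro h b hb
    have hj : b + 1 < l.length := by omega
    rw [List.getD_eq_getElem l 0 (by omega), List.getD_eq_getElem l 0 (by omega)]
    exact h b hj

lemma pvChainB_iff (l : List Int) : pvChainB l = true ↔ pvGood l := by
  unfold pvChainB pvGood
  rw [PySem.List.slice_from_one]
  simp only [List.all_eq_true, decide_eq_true_eq]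
  constructor
  · intro h j hj
    have hz : j < (l.zip l.tail).length := by
      simp [List.length_zip, List.length_tail]; omega
    have := h (l.zip l.tail)[j] (List.getElem_mem hz)
    rwa [List.getElem_zip, List.getElem_tail] at this
  · intro h p hp
    obtain ⟨j, hj, rfl⟩ := List.getElem_of_mem hp
    have hj' : j + 1 < l.length := by
      simp [List.length_zip, List.length_tail] at hj; omega
    rw [List.getElem_zip, List.getElem_tail]
    exact h j hj'

lemma pvChainB_eq_decreasingA (l : List Int) : pvChainB l = pvDecreasingA l := by
  rcases h : pvDecreasingA l with _ | _
  · rcases h2 : pvChainB l with _ | _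
    · rfl
    · exact absurd ((pvDecreasingA_iff l).2 ((pvChainB_iff l).1 h2)) (by simp [h])
  · exact (pvChainB_iff l).2 ((pvDecreasingA_iff l).1 h)

-- the removal lst[:i] + lst[i+1:] is eraseIdx
lemma pvSlice_eraseIdx (l : List Int) (i : Nat) :
    PySem.List.slice l none (some (i : Int)) ++ PySem.List.slice l (some ((i : Int) + 1)) none
      = l.eraseIdx i := by
  have h1 : ((i : Int) + 1) = ((i + 1 : Nat) : Int) := by push_cast; ring
  rw [PySem.List.slice_to_natCast, h1, PySem.List.slice_from_natCast,
    List.eraseIdx_eq_take_drop_succ]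

-- a bad pair (j, j+1) survives removal of any index other than j or j+1
lemma pvBad_survives (l : List Int) (j i : Nat) (hj : j + 1 < l.length)
    (hbad : ¬ (1 ≤ l[j] - l[j + 1] ∧ l[j] - l[j + 1] ≤ 3))
    (hij : i ≠ j) (hij1 : i ≠ j + 1) : ¬ pvGood (l.eraseIdx i) := by
  intro hgood
  by_cases hi : i < l.length
  · have hlen : (l.eraseIdx i).length = l.length - 1 := by
      rw [List.length_eraseIdx]; rw [if_pos hi]
    rcases Nat.lt_or_ge i j with hlt | hge
    · -- i < j: the bad pair sits at positions (j-1, j) of the erased list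
      obtain ⟨k, rfl⟩ : ∃ k, j = k + 1 := ⟨j - 1, by omega⟩
      have hk1 : k + 1 < (l.eraseIdx i).length := by omega
      have := hgood k hk1
      rw [List.getElem_eraseIdx, List.getElem_eraseIdx] at this
      simp only [dif_neg (by omega : ¬ k < i), dif_neg (by omega : ¬ k + 1 < i)] at this
      exact hbad this
    · -- i > j+1: the bad pair is untouched at (j, j+1)
      have hgt : j + 1 < i := by omega
      have hj2 : j + 1 < (l.eraseIdx i).length := by omega
      have := hgood j hj2
      rw [List.getElem_eraseIdx, List.getElem_eraseIdx] at this
      simp only [dif_pos (by omega : j < i), dif_pos (by omega : j + 1 < i)] at this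
      exact hbad this
  · -- i ≥ length: erasing changes nothing
    rw [List.eraseIdx_of_length_le (by omega)] at hgood
    exact hbad (hgood j hj)

-- characterisation of B's findIdx? in the some case
lemma pvFind_some (lst : List Int) (j : Nat)
    (h : (lst.zip (PySem.List.slice lst (some 1) none)).findIdx?
        (fun p => !decide (1 ≤ p.1 - p.2 ∧ p.1 - p.2 ≤ 3)) = some j) :
    j + 1 < lst.length ∧ ¬ (1 ≤ lst[j]'(by
      have := (List.findIdx?_eq_some_iff_findIdx_eq.1 h).1
      simp [PySem.List.slice_from_one, List.length_zip, List.length_tail] at this; omega)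
      - lst[j + 1]'(by
      have := (List.findIdx?_eq_some_iff_findIdx_eq.1 h).1
      simp [PySem.List.slice_from_one, List.length_zip, List.length_tail] at this; omega)
      ∧ lst[j]'(by
      have := (List.findIdx?_eq_some_iff_findIdx_eq.1 h).1
      simp [PySem.List.slice_from_one, List.length_zip, List.length_tail] at this; omega)
      - lst[j + 1]'(by
      have := (List.findIdx?_eq_some_iff_findIdx_eq.1 h).1
      simp [PySem.List.slice_from_one, List.length_zip, List.length_tail] at this; omega) ≤ 3) := by
  rw [PySem.List.slice_from_one] at h
  obtain ⟨hlt, hfi⟩ := List.findIdx?_eq_some_iff_findIdx_eq.1 h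
  have hj1 : j + 1 < lst.length := by
    simp [List.length_zip, List.length_tail] at hlt; omega
  refine ⟨hj1, ?_⟩
  have hp := (List.findIdx_eq (p := fun p => !decide (1 ≤ p.1 - p.2 ∧ p.1 - p.2 ≤ 3)) hlt).1 hfi |>.1
  rw [List.getElem_zip, List.getElem_tail] at hp
  simp only [Bool.not_eq_eq_eq_not, Bool.not_true, decide_eq_false_iff_not] at hp
  exact hp

-- ===== VERDICT (by name: the statement is the Claim_ definition above) =====
theorem decreasing_with_dampener_spec : Claim_equal_decreasing_with_dampener := by
  intro lst _
  unfold Spec_decreasing_with_dampener decreasing_with_dampener decreasing_with_dampener_alt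
  rcases hf : (lst.zip (PySem.List.slice lst (some 1) none)).findIdx?
      (fun p => !decide (1 ≤ p.1 - p.2 ∧ p.1 - p.2 ≤ 3)) with _ | j
  · -- no bad pair: lst is good, A takes the if-branch
    simp only [hf]
    rw [PySem.List.slice_from_one] at hf
    have hgood : pvGood lst := by
      intro k hk
      have hz : k < (lst.zip lst.tail).length := by
        simp [List.length_zip, List.length_tail]; omega
      have := List.findIdx?_eq_none_iff.1 hf (lst.zip lst.tail)[k] (List.getElem_mem hz)
      rw [List.getElem_zip, List.getElem_tail] at this
      simpa using this
    rw [if_pos ((pvDecreasingA_iff lst).2 hgood)]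
  · simp only [hf]
    obtain ⟨hj1, hbad⟩ := pvFind_some lst j hf
    have hAfalse : pvDecreasingA lst = false := by
      rcases h : pvDecreasingA lst with _ | _
      · rfl
      · exact absurd ((pvDecreasingA_iff lst).1 h j hj1) hbad
    rw [if_neg (by simp [hAfalse])]
    simp only [pvSlice_eraseIdx]
    have e1 : ((j : Int) + 1) = ((j + 1 : Nat) : Int) := by push_cast; ring
    have e2 : ((j : Int) + 2) = (((j + 1 : Nat) : Int) + 1) := by push_cast; ring
    rw [e1, e2, pvSlice_eraseIdx]
    -- both sides are now Bool; compare via their truth conditions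
    rcases hB : (pvChainB (lst.eraseIdx j) || pvChainB (lst.eraseIdx (j + 1))) with _ | _
    · -- neither removal works, so no removal works
      simp only [Bool.or_eq_false_iff] at hB
      rw [List.any_eq_false]
      intro i hi
      simp only [Bool.not_eq_true]
      rcases h : pvDecreasingA (lst.eraseIdx i) with _ | _
      · rfl
      · exfalso
        have hgood := (pvDecreasingA_iff _).1 h
        by_cases hij : i = j
        · subst hij
          rw [← pvDecreasingA_iff, ← pvChainB_eq_decreasingA] at hgood
          simp [hB.1] at hgood
        by_cases hij1 : i = j + 1
        · subst hij1
          rw [← pvDecreasingA_iff, ← pvChainB_eq_decreasingA] at hgood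
          simp [hB.2] at hgood
        exact pvBad_survives lst j i hj1 hbad hij hij1 hgood
    · -- one of the two removals works; it is a valid witness for A's any
      rw [List.any_eq_true]
      rcases Bool.or_eq_true_iff.1 hB with hw | hw
      · exact ⟨j, by rw [List.mem_range]; omega,
          by rw [← pvChainB_eq_decreasingA]; exact hw⟩
      · exact ⟨j + 1, by rw [List.mem_range]; omega,
          by rw [← pvChainB_eq_decreasingA]; exact hw⟩
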